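-- pv_equiv track=rewrite | github.com/Alpha-Leporis/code | questions/HR/Find_Delayed_flights.py | find_delayed_flights
-- ===== SOURCE A (Python) =====
-- def find_delayed_flights(flight_nodes, flight_from, flight_to, k, delayed):
--     # Create a graph representation using adjacency lists
--     graph = [[] for _ in range(flight_nodes + 1)]
--     for i in range(len(flight_from)):
--         graph[flight_to[i]].append(flight_from[i])
--
--     # Set to store delayed flights
--     delayed_flights = set()
--
--     # Function to perform DFS
--     def dfs(node):
--         if node in delayed_flights:
--             return
--         delayed_flights.add(node)
--         for next_node in graph[node]:
--             dfs(next_node)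
--
--     # Perform DFS for each delayed flight
--     for flight in delayed:
--         dfs(flight)
--
--     # Sort and return delayed flights
--     delayed_flights = sorted(list(delayed_flights))
--     return delayed_flights
-- ===== SOURCE B (Python) =====
-- def find_delayed_flights(flight_nodes, flight_from, flight_to, k, delayed):
--     # Reverse adjacency list, as in the problem statement
--     graph = [[] for _ in range(flight_nodes + 1)]
--     for i in range(len(flight_from)):
--         graph[flight_to[i]].append(flight_from[i])
--
--     visited = set()
--     for flight in delayed:
--         # iterative DFS with an explicit stack instead of recursion
--         stack = [flight]
--         while stack:
--             node = stack.pop()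
--             if node in visited:
--                 continue
--             visited.add(node)
--             stack.extend(reversed(graph[node]))
--
--     return sorted(visited)
-- ===== Notes on version B (the rewrite author's own statement) =====
-- stated objective: idiomatic
-- what changed: The recursive nested dfs() is replaced by an iterative DFS with an explicit stack (pop / extend with reversed(graph[node])), avoiding Python recursion and the nested function.
-- outside the precondition, e.g. on find_delayed_flights(0, [5], [0], 0, []): A returns [], B returns []
import Mathlib
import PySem

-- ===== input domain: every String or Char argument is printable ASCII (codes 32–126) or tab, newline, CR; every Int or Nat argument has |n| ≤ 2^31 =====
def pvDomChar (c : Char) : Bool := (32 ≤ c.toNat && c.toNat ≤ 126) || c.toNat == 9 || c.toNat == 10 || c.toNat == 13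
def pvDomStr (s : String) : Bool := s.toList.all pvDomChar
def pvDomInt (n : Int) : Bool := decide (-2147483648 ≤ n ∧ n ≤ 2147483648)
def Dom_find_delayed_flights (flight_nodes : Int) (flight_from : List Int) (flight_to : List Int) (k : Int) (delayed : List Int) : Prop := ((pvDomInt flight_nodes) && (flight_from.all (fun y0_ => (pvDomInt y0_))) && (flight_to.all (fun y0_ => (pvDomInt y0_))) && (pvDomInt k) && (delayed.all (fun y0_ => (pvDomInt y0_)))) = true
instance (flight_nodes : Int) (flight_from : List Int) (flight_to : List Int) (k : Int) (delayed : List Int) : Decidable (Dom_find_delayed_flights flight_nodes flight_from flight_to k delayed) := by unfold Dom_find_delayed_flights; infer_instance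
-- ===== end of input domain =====

-- B replaces A's recursive nested dfs by an iterative explicit-stack DFS (idiomatic); same return value.
-- Both ports are fueled (fuel = a bound on the total number of dfs calls / stack pops, a pure totality device)
-- and share the graph-building helper, which is the identical loop in both Pythons.

-- ===== PORT A =====
-- graph = [[] for _ in range(flight_nodes+1)]; for i in range(len(flight_from)): graph[flight_to[i]].append(flight_from[i])
-- (an out-of-range index makes Python raise IndexError: such inputs are outside Pre_; the port skips the write / reads [])
def pvMkGraph (flight_nodes : Int) (flight_from : List Int) (flight_to : List Int) : List (List Int) :=
  (List.range flight_from.length).foldl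
    (fun g i =>
      match PySem.List.pyGet? flight_to (i : Int), PySem.List.pyGet? flight_from (i : Int) with
      | some t, some f => PySem.List.pySetD g t (PySem.List.pyGetD g t [] ++ [f])
      | _, _ => g)
    (List.replicate (flight_nodes + 1).toNat ([] : List Int))

-- fuel: an upper bound on the total number of dfs calls / stack pops (totality device only)
def pvFuel (flight_from : List Int) (delayed : List Int) : Nat :=
  (delayed.length + flight_from.length + 1) * (flight_from.length + 2)

mutual
-- def dfs(node): if node in delayed_flights: return; delayed_flights.add(node); for nb in graph[node]: dfs(nb)
-- fuel is consumed once per call; 'min p.1 f' is a termination guard only (provably p.1 ≤ f, lemma pvFuelLe below)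
def pvDfs (g : List (List Int)) (f : Nat) (node : Int) (vis : PySem.Set Int) : Nat × PySem.Set Int :=
  match f with
  | 0 => (0, vis)
  | f' + 1 =>
    if node ∈ vis then (f', vis)
    else pvDfsList g f' (PySem.Set.add vis node) (PySem.List.pyGetD g node [])
termination_by (f, 0)

-- the 'for nb in graph[node]: dfs(nb)' loop (also A's top-level 'for flight in delayed: dfs(flight)' loop)
def pvDfsList (g : List (List Int)) (f : Nat) (vis : PySem.Set Int) (ns : List Int) : Nat × PySem.Set Int :=
  match ns with
  | [] => (f, vis)
  | n :: rest =>
    let p := pvDfs g f n vis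
    pvDfsList g (min p.1 f) p.2 rest
termination_by (f, ns.length + 1)
decreasing_by
  · simp [Prod.lex_iff]
  · simp only [Prod.lex_iff, List.length_cons]
    rcases Nat.lt_or_ge (min p.1 f) f with h | h
    · exact Or.inl h
    · exact Or.inr ⟨le_antisymm (Nat.min_le_right _ _) h, by omega⟩
end

def find_delayed_flights (flight_nodes : Int) (flight_from : List Int) (flight_to : List Int) (k : Int) (delayed : List Int) : List Int :=
  -- for flight in delayed: dfs(flight)   then   return sorted(list(delayed_flights))
  PySem.List.sorted
    (pvDfsList (pvMkGraph flight_nodes flight_from flight_to) (pvFuel flight_from delayed) PySem.Set.empty delayed).2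
    (fun x => x) false

-- ===== PORT B =====
-- while stack: node = stack.pop(); if node in visited: continue; visited.add(node); stack.extend(reversed(graph[node]))
def pvStackRun (g : List (List Int)) (f : Nat) (stack : List Int) (vis : PySem.Set Int) : Nat × PySem.Set Int :=
  match f with
  | 0 => (0, vis)
  | f' + 1 =>
    match stack.getLast? with
    | none => (f' + 1, vis)
    | some node =>
      if node ∈ vis then pvStackRun g f' stack.dropLast vis
      else pvStackRun g f' (stack.dropLast ++ (PySem.List.pyGetD g node []).reverse) (PySem.Set.add vis node)

def find_delayed_flights_alt (flight_nodes : Int) (flight_from : List Int) (flight_to : List Int) (k : Int) (delayed : List Int) : List Int :=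
  -- for flight in delayed: stack = [flight]; while stack: …   then   return sorted(visited)
  PySem.List.sorted
    (delayed.foldl (fun p fl => pvStackRun (pvMkGraph flight_nodes flight_from flight_to) p.1 [fl] p.2)
      (pvFuel flight_from delayed, PySem.Set.empty)).2
    (fun x => x) false

-- ===== PRECONDITION & SPEC =====
-- Pre_ = Python returns normally: flight_to is long enough, and every flight id that is written to or can be
-- visited (the flight_to prefix, flight_from values, delayed values) is a valid Python index into the n+1 rows
-- (negative wraparound indices included).  Mild stated narrowing: an out-of-range flight_from value that is
-- never actually reached by the DFS would not make A raise, but Pre_ excludes it anyway (closed form).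
def pvInRange (flight_nodes x : Int) : Prop := -(flight_nodes + 1) ≤ x ∧ x < flight_nodes + 1

def Pre_find_delayed_flights (flight_nodes : Int) (flight_from : List Int) (flight_to : List Int) (k : Int) (delayed : List Int) : Prop :=
  flight_from.length ≤ flight_to.length ∧
  (∀ x ∈ flight_to.take flight_from.length, pvInRange flight_nodes x) ∧
  (∀ x ∈ flight_from, pvInRange flight_nodes x) ∧
  (∀ x ∈ delayed, pvInRange flight_nodes x)

instance (flight_nodes : Int) (flight_from : List Int) (flight_to : List Int) (k : Int) (delayed : List Int) : Decidable (Pre_find_delayed_flights flight_nodes flight_from flight_to k delayed) := by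
  unfold Pre_find_delayed_flights pvInRange; infer_instance

def pvWitness_find_delayed_flights : Int × List Int × List Int × Int × List Int := (2, [0, 1], [1, 2], 0, [2])

def Spec_find_delayed_flights (flight_nodes : Int) (flight_from : List Int) (flight_to : List Int) (k : Int) (delayed : List Int) (out : List Int) : Prop := out = find_delayed_flights_alt flight_nodes flight_from flight_to k delayed
instance (flight_nodes : Int) (flight_from : List Int) (flight_to : List Int) (k : Int) (delayed : List Int) (out : List Int) : Decidable (Spec_find_delayed_flights flight_nodes flight_from flight_to k delayed out) := by unfold Spec_find_delayed_flights; infer_instance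

-- ===== CLAIM (what is proved, stated in full; the proofs are below) =====
def Claim_equal_find_delayed_flights : Prop := ∀ (flight_nodes : Int) (flight_from : List Int) (flight_to : List Int) (k : Int) (delayed : List Int), Dom_find_delayed_flights flight_nodes flight_from flight_to k delayed → Pre_find_delayed_flights flight_nodes flight_from flight_to k delayed → Spec_find_delayed_flights flight_nodes flight_from flight_to k delayed (find_delayed_flights flight_nodes flight_from flight_to k delayed)

-- ===== LEMMAS AND PROOFS =====

theorem pvFuelLe (g : List (List Int)) : ∀ f : Nat, (∀ (node : Int) (vis : PySem.Set Int), (pvDfs g f node vis).1 ≤ f) ∧ (∀ (ns : List Int) (vis : PySem.Set Int), (pvDfsList g f vis ns).1 ≤ f) := by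
  intro f
  induction f using Nat.strong_induction_on with
  | _ f IH =>
    have hd : ∀ (node : Int) (vis : PySem.Set Int), (pvDfs g f node vis).1 ≤ f := by
      intro node vis
      match f with
      | 0 => simp [pvDfs]
      | f' + 1 =>
        rw [pvDfs]
        split
        · simp
        · exact le_trans ((IH f' (Nat.lt_succ_self f')).2 _ _) (Nat.le_succ f')
    refine ⟨hd, ?_⟩
    intro ns vis
    induction ns generalizing vis with
    | nil => simp [pvDfsList]
    | cons n rest IHns =>
      rw [pvDfsList]
      rcases Nat.lt_or_ge (min (pvDfs g f n vis).1 f) f with h | h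
      · exact le_trans ((IH _ h).2 _ _) (Nat.le_of_lt h)
      · have hm : min (pvDfs g f n vis).1 f = f := le_antisymm (Nat.min_le_right _ _) h
        rw [hm]; exact IHns _

theorem pvDfs_zero (g : List (List Int)) (node : Int) (vis : PySem.Set Int) : pvDfs g 0 node vis = (0, vis) := by
  rw [pvDfs]

theorem pvDfsList_nil (g : List (List Int)) (f : Nat) (vis : PySem.Set Int) : pvDfsList g f vis [] = (f, vis) := by
  rw [pvDfsList]

theorem pvDfsList_cons (g : List (List Int)) (f : Nat) (vis : PySem.Set Int) (n : Int) (rest : List Int) :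
    pvDfsList g f vis (n :: rest) = pvDfsList g (pvDfs g f n vis).1 (pvDfs g f n vis).2 rest := by
  rw [pvDfsList]
  have h : min (pvDfs g f n vis).1 f = (pvDfs g f n vis).1 := Nat.min_eq_left ((pvFuelLe g f).1 n vis)
  rw [h]

theorem pvDfs_fst_lt (g : List (List Int)) (f' : Nat) (n : Int) (vis : PySem.Set Int) :
    (pvDfs g (f' + 1) n vis).1 < f' + 1 := by
  rw [pvDfs]
  split
  · simp
  · exact Nat.lt_succ_of_le ((pvFuelLe g f').2 _ _)

theorem pvStackRun_nil (g : List (List Int)) (f : Nat) (vis : PySem.Set Int) :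
    pvStackRun g f [] vis = (f, vis) := by
  match f with
  | 0 => rw [pvStackRun]
  | f' + 1 => simp [pvStackRun]

-- the bisimulation: one stack pop of B corresponds to one dfs call of A (same fuel accounting),
-- and a block of reversed neighbours on the stack corresponds to A's neighbour for-loop
theorem pvBisim (g : List (List Int)) : ∀ f : Nat,
    (∀ (s : List Int) (node : Int) (vis : PySem.Set Int),
      pvStackRun g f (s ++ [node]) vis = pvStackRun g (pvDfs g f node vis).1 s (pvDfs g f node vis).2) ∧
    (∀ (ns s : List Int) (vis : PySem.Set Int),
      pvStackRun g f (s ++ ns.reverse) vis = pvStackRun g (pvDfsList g f vis ns).1 s (pvDfsList g f vis ns).2) := by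
  intro f
  induction f using Nat.strong_induction_on with
  | _ f IH =>
    have hL : ∀ (s : List Int) (node : Int) (vis : PySem.Set Int),
        pvStackRun g f (s ++ [node]) vis = pvStackRun g (pvDfs g f node vis).1 s (pvDfs g f node vis).2 := by
      intro s node vis
      match f with
      | 0 => rw [pvDfs_zero, pvStackRun, pvStackRun]
      | f' + 1 =>
        rw [pvStackRun, pvDfs]
        simp only [List.getLast?_concat, List.dropLast_concat]
        split
        · rfl
        · exact (IH f' (Nat.lt_succ_self f')).2 _ _ _
    refine ⟨hL, ?_⟩
    intro ns
    induction ns with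
    | nil => intro s vis; rw [pvDfsList_nil]; simp
    | cons n rest IHns =>
      intro s vis
      have hrev : (n :: rest).reverse = rest.reverse ++ [n] := by simp
      rw [hrev, pvDfsList_cons, ← List.append_assoc, hL]
      match f with
      | 0 =>
        rw [pvDfs_zero]
        exact IHns s vis
      | f' + 1 =>
        exact (IH _ (pvDfs_fst_lt g f' n vis)).2 rest s _

theorem pvStackRun_single (g : List (List Int)) (f : Nat) (fl : Int) (vis : PySem.Set Int) :
    pvStackRun g f [fl] vis = pvDfs g f fl vis := by
  have h := (pvBisim g f).1 [] fl vis
  rw [pvStackRun_nil] at h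
  simpa using h

theorem pvFold_eq (g : List (List Int)) : ∀ (ds : List Int) (f : Nat) (vis : PySem.Set Int),
    ds.foldl (fun p fl => pvStackRun g p.1 [fl] p.2) (f, vis) = pvDfsList g f vis ds := by
  intro ds
  induction ds with
  | nil => intro f vis; rw [pvDfsList_nil, List.foldl_nil]
  | cons d rest IH =>
    intro f vis
    rw [pvDfsList_cons, List.foldl_cons, pvStackRun_single]
    exact IH _ _

-- ===== VERDICT (by name: the statement is the Claim_ definition above) =====
theorem find_delayed_flights_spec : Claim_equal_find_delayed_flights := by
  intro flight_nodes flight_from flight_to k delayed _ _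
  unfold Spec_find_delayed_flights find_delayed_flights find_delayed_flights_alt
  rw [pvFold_eq]
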